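-- pv_equiv track=rewrite | github.com/guilty-circassianwalnut723/Macro | bagel/process_config.py | adjust_data_to_target_num
-- ===== SOURCE A (Python) =====
-- from typing import Dict, List, Optional, Tuple, Any
--
-- def adjust_data_to_target_num(data_list: List[dict], target_num: int) -> List[dict]:
--     """Adjust data list to the target count."""
--     if not data_list:
--         return []
--
--     original_count = len(data_list)
--
--     if target_num <= 0:
--         return data_list
--
--     if target_num <= original_count:
--         return data_list[:target_num]
--     else:
--         result = []
--         while len(result) < target_num:
--             result.extend(data_list)
--         return result[:target_num]
-- ===== SOURCE B (Python) =====
-- def adjust_data_to_target_num(data_list, target_num):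
--     """Adjust data list to the target count."""
--     if not data_list:
--         return []
--     if target_num <= 0:
--         return data_list
--     if target_num <= len(data_list):
--         return data_list[:target_num]
--     q, r = divmod(target_num, len(data_list))
--     return data_list * q + data_list[:r]
-- ===== Notes on version B (the rewrite author's own statement) =====
-- stated objective: simpler
-- what changed: The while-extend-then-truncate loop is replaced by a closed-form divmod: q full repetitions of the list plus its first r elements, computed arithmetically instead of by repeated extension.
import Mathlib
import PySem

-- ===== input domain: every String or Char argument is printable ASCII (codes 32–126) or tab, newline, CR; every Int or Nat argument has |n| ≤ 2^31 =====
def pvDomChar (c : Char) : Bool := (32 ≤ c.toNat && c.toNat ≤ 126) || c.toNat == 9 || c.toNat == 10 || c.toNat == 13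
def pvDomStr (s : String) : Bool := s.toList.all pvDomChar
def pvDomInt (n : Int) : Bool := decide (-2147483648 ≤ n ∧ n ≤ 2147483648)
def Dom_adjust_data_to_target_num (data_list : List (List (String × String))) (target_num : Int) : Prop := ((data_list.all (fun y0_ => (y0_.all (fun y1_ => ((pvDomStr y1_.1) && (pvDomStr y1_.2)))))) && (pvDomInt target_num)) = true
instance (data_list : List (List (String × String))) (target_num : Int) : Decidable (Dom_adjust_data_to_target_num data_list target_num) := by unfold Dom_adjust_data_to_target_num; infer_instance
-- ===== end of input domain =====

-- B replaces A's while-extend-then-truncate loop with a closed-form divmod (q whole copies + first r elements); objective: simpler.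


-- ===== PORT A =====
-- the `while len(result) < target_num: result.extend(data_list)` loop; the hypothesis hd only justifies termination
def pvALoop (d : List (List (String × String))) (hd : d ≠ []) (target : Nat)
    (result : List (List (String × String))) : List (List (String × String)) :=
  if _h : result.length < target then pvALoop d hd target (result ++ d) else result
termination_by target - result.length
decreasing_by
  simp only [List.length_append]
  have := List.length_pos_of_ne_nil hd
  omega

def adjust_data_to_target_num (data_list : List (List (String × String))) (target_num : Int) : List (List (String × String)) :=
  if h : data_list = [] then []
  else if target_num ≤ 0 then data_list
  else if target_num ≤ (data_list.length : Int) then PySem.List.slice data_list none (some target_num)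
  else PySem.List.slice (pvALoop data_list h target_num.toNat []) none (some target_num)

-- ===== PORT B =====
def adjust_data_to_target_num_alt (data_list : List (List (String × String))) (target_num : Int) : List (List (String × String)) :=
  if data_list = [] then []
  else if target_num ≤ 0 then data_list
  else if target_num ≤ (data_list.length : Int) then PySem.List.slice data_list none (some target_num)
  else
    let q := PySem.Int.floordiv target_num (data_list.length : Int)
    let r := PySem.Int.mod target_num (data_list.length : Int)
    (List.replicate q.toNat data_list).flatten ++ PySem.List.slice data_list none (some r)

-- ===== PRECONDITION & SPEC =====
def Spec_adjust_data_to_target_num (data_list : List (List (String × String))) (target_num : Int) (out : List (List (String × String))) : Prop := out = adjust_data_to_target_num_alt data_list target_num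
instance (data_list : List (List (String × String))) (target_num : Int) (out : List (List (String × String))) : Decidable (Spec_adjust_data_to_target_num data_list target_num out) := by unfold Spec_adjust_data_to_target_num; infer_instance

-- ===== CLAIM (what is proved, stated in full; the proofs are below) =====
def Claim_equal_adjust_data_to_target_num : Prop := ∀ (data_list : List (List (String × String))) (target_num : Int), Dom_adjust_data_to_target_num data_list target_num → Spec_adjust_data_to_target_num data_list target_num (adjust_data_to_target_num data_list target_num)

-- ===== LEMMAS AND PROOFS =====

-- appending a copy of d on the left or right of repeated copies is the same list
lemma flatten_replicate_comm (d : List (List (String × String))) (t : Nat) :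
    d ++ (List.replicate t d).flatten = (List.replicate t d).flatten ++ d := by
  induction t with
  | zero => simp
  | succ t ih =>
    simp only [List.replicate_succ, List.flatten_cons]
    rw [ih, ← List.append_assoc, ih]

-- the loop appends whole copies of d; its first `target` elements are those of enough copies of d
lemma pvALoop_take (d : List (List (String × String))) (hd : d ≠ []) (target : Nat) :
    ∀ result : List (List (String × String)),
      (pvALoop d hd target result).take target
        = (result ++ (List.replicate target d).flatten).take target := by
  intro result
  fun_induction pvALoop d hd target result with
  | case1 res h ih =>
    have hn := List.length_pos_of_ne_nil hd
    rw [ih, List.append_assoc, flatten_replicate_comm, ← List.append_assoc,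
        List.take_append_of_le_length]
    simp only [List.length_append, List.length_flatten, List.map_replicate,
      List.sum_replicate, smul_eq_mul]
    have : target ≤ target * d.length := Nat.le_mul_of_pos_right _ hn
    omega
  | case2 res h =>
    rw [List.take_append_of_le_length (by omega)]

-- truncating enough copies of d is q whole copies plus the first r elements
lemma take_flatten_replicate (d : List (List (String × String))) (q r : Nat)
    (hr : r < d.length) :
    ∀ k : Nat, q * d.length + r ≤ k * d.length →
      ((List.replicate k d).flatten).take (q * d.length + r)
        = (List.replicate q d).flatten ++ d.take r := by
  induction q with
  | zero =>
    intro k hk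
    cases k with
    | zero => simp at hk ⊢; omega
    | succ k =>
      simp only [Nat.zero_mul, Nat.zero_add, List.replicate_succ, List.flatten_cons,
        List.replicate_zero, List.flatten_nil, List.nil_append]
      exact List.take_append_of_le_length (Nat.le_of_lt hr)
  | succ q ih =>
    intro k hk
    have hn : 0 < d.length := by omega
    cases k with
    | zero => exfalso; simp only [Nat.zero_mul] at hk; nlinarith
    | succ k =>
      simp only [List.replicate_succ, List.flatten_cons]
      rw [List.take_append, List.take_of_length_le (by nlinarith [Nat.succ_mul q d.length]),
          List.append_assoc]
      congr 1
      have e1 : (q + 1) * d.length + r - d.length = q * d.length + r := by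
        rw [Nat.succ_mul]; omega
      rw [e1]
      exact ih k (by simp only [Nat.succ_mul] at hk; omega)

-- ===== VERDICT (by name: the statement is the Claim_ definition above) =====

theorem adjust_data_to_target_num_spec : Claim_equal_adjust_data_to_target_num := by
  intro d t _
  unfold Spec_adjust_data_to_target_num adjust_data_to_target_num adjust_data_to_target_num_alt
  split_ifs with hd ht htn
  · rfl
  · rfl
  · rfl
  · -- loop branch
    have hn : 0 < d.length := List.length_pos_of_ne_nil hd
    have hnz : (0 : Int) < (d.length : Int) := by exact_mod_cast hn
    have ht' : 0 < t := by omega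
    rw [PySem.Int.floordiv_eq_ediv_of_pos hnz, PySem.Int.mod_eq_emod_of_pos hnz]
    have hqn : 0 ≤ t / (d.length : Int) := Int.ediv_nonneg (le_of_lt ht') (le_of_lt hnz)
    have hrn : 0 ≤ t % (d.length : Int) := Int.emod_nonneg t (by omega)
    have hrlt : t % (d.length : Int) < (d.length : Int) := Int.emod_lt_of_pos t hnz
    simp only []
    rw [PySem.List.slice_to _ (le_of_lt ht'), PySem.List.slice_to _ hrn]
    rw [pvALoop_take d hd t.toNat [], List.nil_append]
    have hdecomp : t.toNat = (t / (d.length : Int)).toNat * d.length + (t % (d.length : Int)).toNat := by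
      have e : (((t / (d.length : Int)).toNat * d.length + (t % (d.length : Int)).toNat : Nat) : Int) = t := by
        push_cast [Int.toNat_of_nonneg hqn, Int.toNat_of_nonneg hrn]
        rw [mul_comm]
        exact Int.mul_ediv_add_emod t (d.length : Int)
      have h2 := congrArg Int.toNat e
      rw [Int.toNat_natCast] at h2
      exact h2.symm
    have hk : (t / (d.length : Int)).toNat * d.length + (t % (d.length : Int)).toNat ≤ t.toNat * d.length := by
      rw [← hdecomp]; exact Nat.le_mul_of_pos_right _ hn
    have hfin := take_flatten_replicate d (t / (d.length : Int)).toNat (t % (d.length : Int)).toNat (by omega) t.toNat hk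
    rw [← hdecomp] at hfin
    exact hfin
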